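-- pv_equiv track=rewrite | github.com/christophevg/c3 | skills/git-activity-report/scripts/generate-report.py | generate_accomplishment_list
-- ===== SOURCE A (Python) =====
-- from collections import defaultdict
--
-- PREFIX_GROUPS = [
--   "feat", "feature",
--   "fix", "bugfix",
--   "docs", "documentation",
--   "refactor",
--   "test", "tests",
--   "chore",
--   "style",
--   "perf", "performance",
--   "build",
--   "ci",
-- ]
--
-- def parse_commit_subject(subject: str) -> tuple[str, str]:
--   """
--   Parse a commit subject into prefix and description.
--
--   Returns:
--     (prefix, description) where prefix may be empty
--   """
--   # Check for conventional commit format: "prefix: description" or "prefix(scope): description"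
--   for prefix in PREFIX_GROUPS:
--     if subject.lower().startswith(prefix + ":"):
--       return prefix, subject[len(prefix)+1:].strip()
--     if subject.lower().startswith(prefix + "("):
--       # Find closing paren
--       idx = subject.find("):")
--       if idx > 0:
--         return prefix, subject[idx+2:].strip()
--
--   return "", subject
--
-- def format_accomplishment(subject: str) -> str:
--   """
--   Format a commit subject as an accomplishment.
--
--   - Strip conventional prefixes
--   - Convert to present tense (simple heuristic)
--   - Capitalize first letter
--   """
--   prefix, description = parse_commit_subject(subject)
--
--   # Simple present tense conversion
--   desc = description
--   if desc:
--     # Capitalize first letter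
--     desc = desc[0].upper() + desc[1:]
--
--   return desc
--
-- def group_commits_by_prefix(commits: list[dict]) -> dict[str, list[str]]:
--   """Group commits by their conventional commit prefix."""
--   groups = defaultdict(list)
--
--   for commit in commits:
--     prefix, description = parse_commit_subject(commit["subject"])
--     accomplishment = format_accomplishment(commit["subject"])
--     groups[prefix if prefix else "other"].append(accomplishment)
--
--   return dict(groups)
--
-- def generate_accomplishment_list(commits: list[dict], max_items: int = 15) -> list[str]:
--   """
--   Generate a list of accomplishments from commits.
--
--   Groups similar items, limits output, strips prefixes.
--   """
--   groups = group_commits_by_prefix(commits)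
--
--   # Order: feat, fix, docs, refactor, test, chore, other
--   order = ["feat", "feature", "fix", "bugfix", "docs", "documentation",
--            "refactor", "test", "tests", "chore", "style", "perf", "performance",
--            "build", "ci", "other"]
--
--   accomplishments = []
--
--   for prefix in order:
--     if prefix in groups:
--       for acc in groups[prefix][:max_items - len(accomplishments)]:
--         if len(accomplishments) >= max_items:
--           break
--         accomplishments.append(acc)
--     if len(accomplishments) >= max_items:
--       break
--
--   return accomplishments
-- ===== SOURCE B (Python) =====
-- PREFIX_GROUPS = [
--   "feat", "feature",
--   "fix", "bugfix",
--   "docs", "documentation",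
--   "refactor",
--   "test", "tests",
--   "chore",
--   "style",
--   "perf", "performance",
--   "build",
--   "ci",
-- ]
--
-- ORDER = PREFIX_GROUPS + ["other"]
--
-- def parse_commit_subject(subject):
--   for prefix in PREFIX_GROUPS:
--     if subject.lower().startswith(prefix + ":"):
--       return prefix, subject[len(prefix)+1:].strip()
--     if subject.lower().startswith(prefix + "("):
--       idx = subject.find("):")
--       if idx > 0:
--         return prefix, subject[idx+2:].strip()
--   return "", subject
--
-- def format_accomplishment(subject):
--   prefix, description = parse_commit_subject(subject)
--   desc = description
--   if desc:
--     desc = desc[0].upper() + desc[1:]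
--   return desc
--
-- def generate_accomplishment_list(commits, max_items=15):
--   """Scan the commits once per priority prefix, no grouping dict."""
--   out = []
--   for wanted in ORDER:
--     for commit in commits:
--       prefix, _ = parse_commit_subject(commit["subject"])
--       if (prefix or "other") == wanted:
--         if len(out) >= max_items:
--           return out
--         out.append(format_accomplishment(commit["subject"]))
--   return out
-- ===== Notes on version B (the rewrite author's own statement) =====
-- stated objective: simpler
-- what changed: B drops the grouping dict entirely: instead of bucketing commits into a defaultdict and then concatenating buckets in priority order with slice-based truncation, it scans the commit list once per priority prefix, appending matching formatted subjects and returning as soon as max_items is reached.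
import Mathlib
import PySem

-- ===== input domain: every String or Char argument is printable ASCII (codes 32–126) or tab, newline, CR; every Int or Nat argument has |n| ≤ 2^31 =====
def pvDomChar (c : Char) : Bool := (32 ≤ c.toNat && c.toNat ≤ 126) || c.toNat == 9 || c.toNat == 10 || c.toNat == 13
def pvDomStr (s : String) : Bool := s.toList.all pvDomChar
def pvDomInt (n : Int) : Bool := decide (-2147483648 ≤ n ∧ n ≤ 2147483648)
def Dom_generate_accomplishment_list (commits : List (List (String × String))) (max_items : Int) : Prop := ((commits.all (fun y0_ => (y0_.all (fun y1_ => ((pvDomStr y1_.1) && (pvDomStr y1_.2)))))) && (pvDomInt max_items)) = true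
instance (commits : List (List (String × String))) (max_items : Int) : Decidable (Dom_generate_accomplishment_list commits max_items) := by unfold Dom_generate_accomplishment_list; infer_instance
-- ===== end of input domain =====

-- B replaces A's 'build a dict of buckets, then concatenate buckets in priority order' by
-- 'one scan of the commits per priority prefix, stopping at max_items' — objective: simpler (no dict), same result.

-- ===== PORT A =====
-- shared module constant
def PREFIX_GROUPS : List String :=
  ["feat", "feature", "fix", "bugfix", "docs", "documentation", "refactor",
   "test", "tests", "chore", "style", "perf", "performance", "build", "ci"]

-- the 'for prefix in PREFIX_GROUPS' loop of parse_commit_subject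
def parseLoop : List String → String → String × String
  | [], subject => ("", subject)
  | p :: rest, subject =>
    if PySem.Str.startswith (PySem.Str.lower subject) (p ++ ":") then
      (p, PySem.Str.strip (PySem.Str.slice subject (some (PySem.Str.len p + 1)) none))
    else if PySem.Str.startswith (PySem.Str.lower subject) (p ++ "(") then
      let idx := PySem.Str.find subject "):"
      if idx > 0 then (p, PySem.Str.strip (PySem.Str.slice subject (some (idx + 2)) none))
      else parseLoop rest subject
    else parseLoop rest subject

def parse_commit_subject (subject : String) : String × String := parseLoop PREFIX_GROUPS subject

-- desc[0].upper() + desc[1:] on a non-empty string; upperChar is exact on the ASCII domain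
def format_accomplishment (subject : String) : String :=
  let description := (parse_commit_subject subject).2
  match description.toList with
  | [] => description
  | c :: rest => String.ofList (PySem.Chars.upperChar c :: rest)

-- commit["subject"]: first-match lookup; the default "" is never used on Pre_ (every commit has the key)
def subjOf (commit : List (String × String)) : String :=
  ((PySem.Dict.mk commit).get? "subject").getD ""

def group_commits_by_prefix (commits : List (List (String × String))) : PySem.Dict String (List String) :=
  commits.foldl (fun groups commit =>
    let prefix_ := (parse_commit_subject (subjOf commit)).1
    let accomplishment := format_accomplishment (subjOf commit)
    groups.modify (if prefix_ = "" then "other" else prefix_) [] (fun l => l ++ [accomplishment]))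
    PySem.Dict.empty

def aOrder : List String :=
  ["feat", "feature", "fix", "bugfix", "docs", "documentation", "refactor",
   "test", "tests", "chore", "style", "perf", "performance", "build", "ci", "other"]

-- 'for acc in groups[prefix][:max_items - len(accomplishments)]: if len >= max_items: break; append'
def aInner (m : Int) : List String → List String → List String
  | [], out => out
  | a :: rest, out =>
    if (out.length : Int) ≥ m then out else aInner m rest (out ++ [a])

-- 'for prefix in order: … ; if len >= max_items: break'
def aOuter (groups : PySem.Dict String (List String)) (m : Int) : List String → List String → List String
  | [], out => out
  | p :: rest, out =>
    let out' := if groups.contains p then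
        aInner m (PySem.List.slice (groups.getD p []) none (some (m - (out.length : Int)))) out
      else out
    if (out'.length : Int) ≥ m then out' else aOuter groups m rest out'

def generate_accomplishment_list (commits : List (List (String × String))) (max_items : Int) : List String :=
  aOuter (group_commits_by_prefix commits) max_items aOrder []

-- ===== PORT B =====
def bOrder : List String := PREFIX_GROUPS ++ ["other"]

-- inner 'for commit in commits' scan; .error = the early 'return out'
def bInner (m : Int) (wanted : String) : List (List (String × String)) → List String → Except (List String) (List String)
  | [], out => .ok out
  | c :: rest, out =>
    let prefix_ := (parse_commit_subject (subjOf c)).1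
    if (if prefix_ = "" then "other" else prefix_) = wanted then
      if (out.length : Int) ≥ m then .error out
      else bInner m wanted rest (out ++ [format_accomplishment (subjOf c)])
    else bInner m wanted rest out

-- outer 'for wanted in ORDER' loop
def bOuter (commits : List (List (String × String))) (m : Int) : List String → List String → List String
  | [], out => out
  | w :: rest, out =>
    match bInner m w commits out with
    | .error o => o
    | .ok o => bOuter commits m rest o

def generate_accomplishment_list_alt (commits : List (List (String × String))) (max_items : Int) : List String :=
  bOuter commits max_items bOrder []

-- ===== PRECONDITION & SPEC =====
-- Pre_ excludes commits without a "subject" key, on which Python A raises KeyError (B raises there too).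
def Pre_generate_accomplishment_list (commits : List (List (String × String))) (max_items : Int) : Prop :=
  ∀ c ∈ commits, (PySem.Dict.mk c).contains "subject" = true
instance (commits : List (List (String × String))) (max_items : Int) : Decidable (Pre_generate_accomplishment_list commits max_items) := by unfold Pre_generate_accomplishment_list; infer_instance

def pvWitness_generate_accomplishment_list : (List (List (String × String))) × Int :=
  ([[("subject", "fix: a bug")], [("subject", "feat(ui): new button")]], 15)

def Spec_generate_accomplishment_list (commits : List (List (String × String))) (max_items : Int) (out : List String) : Prop := out = generate_accomplishment_list_alt commits max_items
instance (commits : List (List (String × String))) (max_items : Int) (out : List String) : Decidable (Spec_generate_accomplishment_list commits max_items out) := by unfold Spec_generate_accomplishment_list; infer_instance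

-- ===== CLAIM (what is proved, stated in full; the proofs are below) =====
def Claim_equal_generate_accomplishment_list : Prop := ∀ (commits : List (List (String × String))) (max_items : Int), Dom_generate_accomplishment_list commits max_items → Pre_generate_accomplishment_list commits max_items → Spec_generate_accomplishment_list commits max_items (generate_accomplishment_list commits max_items)

-- ===== LEMMAS AND PROOFS =====

-- the key/value a commit contributes, and the bucket of a priority prefix
def keyOf (c : List (String × String)) : String :=
  let pr := (parse_commit_subject (subjOf c)).1
  if pr = "" then "other" else pr

def bucket (commits : List (List (String × String))) (p : String) : List String :=
  (commits.filter (fun c => keyOf c == p)).map (fun c => format_accomplishment (subjOf c))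

theorem aInner_eq (m : Int) (items out : List String) :
    aInner m items out = out ++ items.take (m - (out.length : Int)).toNat := by
  induction items generalizing out with
  | nil => simp [aInner]
  | cons a rest ih =>
    by_cases h : (out.length : Int) ≥ m
    · have : (m - (out.length : Int)).toNat = 0 := by omega
      simp [aInner, h, this]
    · have ht : (m - (out.length : Int)).toNat = (m - ((out.length : Int) + 1)).toNat + 1 := by omega
      simp only [aInner, if_neg h, ih]
      simp [ht]

theorem aInner_slice_eq (m : Int) (l out : List String) :
    aInner m (PySem.List.slice l none (some (m - (out.length : Int)))) out
      = out ++ l.take (m - (out.length : Int)).toNat := by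
  by_cases h : 0 ≤ m - (out.length : Int)
  · rw [PySem.List.slice_to _ h, aInner_eq]
    simp [List.take_take]
  · have h0 : (m - (out.length : Int)).toNat = 0 := by omega
    cases hs : PySem.List.slice l none (some (m - (out.length : Int))) with
    | nil => simp [aInner, h0]
    | cons a rest =>
      have : (out.length : Int) ≥ m := by omega
      simp [aInner, this, h0]

theorem aOuter_eq (groups : PySem.Dict String (List String)) (m : Int) (ps out : List String) :
    aOuter groups m ps out
      = out ++ (ps.flatMap (fun p => if groups.contains p then groups.getD p [] else [])).take
          (m - (out.length : Int)).toNat := by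
  induction ps generalizing out with
  | nil => simp [aOuter]
  | cons p rest ih =>
    have hout' : (if groups.contains p then
        aInner m (PySem.List.slice (groups.getD p []) none (some (m - (out.length : Int)))) out
      else out)
        = out ++ (if groups.contains p then groups.getD p [] else []).take (m - (out.length : Int)).toNat := by
      by_cases hc : groups.contains p <;> simp [hc, aInner_slice_eq]
    simp only [aOuter, hout', List.flatMap_cons]
    rw [List.take_append]
    generalize (if groups.contains p = true then groups.getD p [] else []) = g
    split_ifs with hstop
    · have h0 : (m - (out.length : Int)).toNat - g.length = 0 := by
        simp only [List.length_append, List.length_take] at hstop; omega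
      rw [h0, List.take_zero, List.append_nil]
    · rw [ih, List.append_assoc]
      have h2 : (m - (((out ++ g.take (m - (out.length : Int)).toNat).length : Nat) : Int)).toNat
          = (m - (out.length : Int)).toNat - g.length := by
        simp only [List.length_append, List.length_take] at hstop ⊢
        push_cast at hstop ⊢
        omega
      rw [h2]

-- the membership test inside bInner, phrased via keyOf (definitional)
theorem keyOf_if_eq (c : List (String × String)) (w : String) :
    ((if (parse_commit_subject (subjOf c)).1 = "" then "other"
        else (parse_commit_subject (subjOf c)).1) = w) = (keyOf c = w) := rfl

theorem bInner_eq (m : Int) (w : String) (cs : List (List (String × String))) (out : List String) :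
    bInner m w cs out
      = if (bucket cs w).length ≤ (m - (out.length : Int)).toNat then
          Except.ok (out ++ bucket cs w)
        else Except.error (out ++ (bucket cs w).take (m - (out.length : Int)).toNat) := by
  induction cs generalizing out with
  | nil => simp [bInner, bucket]
  | cons c rest ih =>
    simp only [bInner, keyOf_if_eq]
    by_cases hk : keyOf c = w
    · have hb : bucket (c :: rest) w = format_accomplishment (subjOf c) :: bucket rest w := by
        simp [bucket, hk]
      rw [if_pos hk, hb]
      by_cases h : (out.length : Int) ≥ m
      · have h0 : (m - (out.length : Int)).toNat = 0 := by omega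
        rw [if_pos h, h0]
        simp
      · have ht : (m - (out.length : Int)).toNat = (m - ((out.length : Int) + 1)).toNat + 1 := by omega
        rw [if_neg h, ih, ht]
        have hlen : (m - (((out ++ [format_accomplishment (subjOf c)]).length : Nat) : Int)).toNat
            = (m - ((out.length : Int) + 1)).toNat := by simp only [List.length_append, List.length_cons, List.length_nil]; push_cast; omega
        rw [hlen]
        by_cases hfit : (bucket rest w).length ≤ (m - ((out.length : Int) + 1)).toNat
        · rw [if_pos hfit, if_pos (show (format_accomplishment (subjOf c) :: bucket rest w).length
              ≤ (m - ((out.length : Int) + 1)).toNat + 1 by simp only [List.length_cons]; omega)]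
          simp
        · rw [if_neg hfit, if_neg (show ¬ (format_accomplishment (subjOf c) :: bucket rest w).length
              ≤ (m - ((out.length : Int) + 1)).toNat + 1 by simp only [List.length_cons]; omega)]
          simp [List.take_succ_cons]
    · have hb : bucket (c :: rest) w = bucket rest w := by
        simp [bucket, hk]
      rw [if_neg hk, ih, hb]

theorem bOuter_eq (commits : List (List (String × String))) (m : Int) (ps out : List String) :
    bOuter commits m ps out
      = out ++ (ps.flatMap (bucket commits)).take (m - (out.length : Int)).toNat := by
  induction ps generalizing out with
  | nil => simp [bOuter]
  | cons w rest ih =>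
    simp only [bOuter, bInner_eq, List.flatMap_cons]
    rw [List.take_append]
    by_cases h : (bucket commits w).length ≤ (m - (out.length : Int)).toNat
    · rw [if_pos h]
      show bOuter commits m rest (out ++ bucket commits w) = _
      rw [ih, List.take_of_length_le h, ← List.append_assoc]
      have h2 : (m - (((out ++ bucket commits w).length : Nat) : Int)).toNat
          = (m - (out.length : Int)).toNat - (bucket commits w).length := by
        simp only [List.length_append]; push_cast; omega
      rw [h2]
    · rw [if_neg h]
      show out ++ (bucket commits w).take (m - (out.length : Int)).toNat = _
      have h0 : (m - (out.length : Int)).toNat - (bucket commits w).length = 0 := by omega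
      rw [h0, List.take_zero, List.append_nil]

-- the dict A builds, characterised
set_option maxHeartbeats 1000000 in
theorem groups_eq_foldl (commits : List (List (String × String))) :
    group_commits_by_prefix commits
      = (commits.map (fun c => (keyOf c, format_accomplishment (subjOf c)))).foldl
          (fun d p => d.modify p.1 [] (fun l => l ++ [p.2])) PySem.Dict.empty := by
  rw [List.foldl_map]
  congr 1

theorem groups_getD (commits : List (List (String × String))) (p : String) :
    (group_commits_by_prefix commits).getD p [] = bucket commits p := by
  rw [groups_eq_foldl, PySem.Dict.getD_foldl_modify_append]
  simp [bucket, List.filter_map, Function.comp_def]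

theorem groups_contains (commits : List (List (String × String))) (p : String) :
    (group_commits_by_prefix commits).contains p = true ↔ p ∈ commits.map keyOf := by
  rw [groups_eq_foldl, PySem.Dict.contains_iff_mem_keys, PySem.Dict.keys_foldl_modify_key]
  rw [show PySem.Set.update (PySem.Dict.empty : PySem.Dict String (List String)).keys
        ((commits.map (fun c => (keyOf c, format_accomplishment (subjOf c)))).map Prod.fst)
      = PySem.Set.ofList ((commits.map (fun c => (keyOf c, format_accomplishment (subjOf c)))).map Prod.fst) from rfl]
  rw [PySem.Set.mem_ofList]
  simp [List.map_map, Function.comp_def]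

theorem gfun_eq_bucket (commits : List (List (String × String))) (p : String) :
    (if (group_commits_by_prefix commits).contains p then (group_commits_by_prefix commits).getD p [] else [])
      = bucket commits p := by
  by_cases hc : (group_commits_by_prefix commits).contains p
  · simp [hc, groups_getD]
  · have hnm : p ∉ commits.map keyOf := fun hm => hc ((groups_contains commits p).mpr hm)
    have : bucket commits p = [] := by
      simp [bucket, List.filter_eq_nil_iff]
      intro c hcmem hk
      exact hnm (List.mem_map.mpr ⟨c, hcmem, hk⟩)
    simp [hc, this]

-- ===== VERDICT (by name: the statement is the Claim_ definition above) =====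
theorem generate_accomplishment_list_spec : Claim_equal_generate_accomplishment_list := by
  intro commits m _ _
  unfold Spec_generate_accomplishment_list
  unfold generate_accomplishment_list generate_accomplishment_list_alt
  rw [aOuter_eq, bOuter_eq]
  have hfun : (fun p => if (group_commits_by_prefix commits).contains p then (group_commits_by_prefix commits).getD p [] else [])
      = bucket commits := funext (gfun_eq_bucket commits)
  rw [hfun]
  rfl
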